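-- pv_equiv track=rewrite | github.com/Bohan-Yu/bishe | fk_ns_second多智能体 - 副本/app/tools.py | _extract_ordered_markers
-- ===== SOURCE A (Python) =====
-- def _extract_ordered_markers(text: str, markers: list[str], limit: int = 8) -> list[str]:
--     lowered = (text or "").lower()
--     hits: list[tuple[int, str]] = []
--     for marker in markers:
--         index = lowered.find(marker.lower())
--         if index >= 0:
--             hits.append((index, marker))
--     hits.sort(key=lambda item: (item[0], len(item[1])))
--
--     ordered: list[str] = []
--     seen = set()
--     for _, marker in hits:
--         normalized = marker.lower()
--         if normalized in seen:
--             continue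
--         seen.add(normalized)
--         ordered.append(marker)
--         if len(ordered) >= limit:
--             break
--     return ordered
-- ===== SOURCE B (Python) =====
-- def _extract_ordered_markers(text: str, markers: list[str], limit: int = 8) -> list[str]:
--     lowered = (text or "").lower()
--     # Distribute markers into buckets by the first-occurrence index of their
--     # lowered form (a counting/bucket sort on the index); walk the buckets in
--     # index order, sorting each small bucket by marker length only, and emit
--     # case-insensitively distinct markers until the limit is reached.
--     buckets = [[] for _ in range(len(lowered) + 1)]
--     for marker in markers:
--         index = lowered.find(marker.lower())
--         if index >= 0:
--             buckets[index].append(marker)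
--     ordered = []
--     seen = set()
--     for bucket in buckets:
--         for marker in sorted(bucket, key=len):
--             normalized = marker.lower()
--             if normalized not in seen:
--                 seen.add(normalized)
--                 ordered.append(marker)
--                 if len(ordered) >= limit:
--                     return ordered
--     return ordered
-- ===== Notes on version B (the rewrite author's own statement) =====
-- stated objective: alternative
-- what changed: B replaces A's global comparison sort of (index, marker) hits by a distribution (bucket) sort: markers are dropped into per-position buckets indexed by the first occurrence of their lowered form, and the buckets are walked in index order with only a tiny per-bucket sort by length, emitting case-insensitively distinct markers until the limit.
import Mathlib
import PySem

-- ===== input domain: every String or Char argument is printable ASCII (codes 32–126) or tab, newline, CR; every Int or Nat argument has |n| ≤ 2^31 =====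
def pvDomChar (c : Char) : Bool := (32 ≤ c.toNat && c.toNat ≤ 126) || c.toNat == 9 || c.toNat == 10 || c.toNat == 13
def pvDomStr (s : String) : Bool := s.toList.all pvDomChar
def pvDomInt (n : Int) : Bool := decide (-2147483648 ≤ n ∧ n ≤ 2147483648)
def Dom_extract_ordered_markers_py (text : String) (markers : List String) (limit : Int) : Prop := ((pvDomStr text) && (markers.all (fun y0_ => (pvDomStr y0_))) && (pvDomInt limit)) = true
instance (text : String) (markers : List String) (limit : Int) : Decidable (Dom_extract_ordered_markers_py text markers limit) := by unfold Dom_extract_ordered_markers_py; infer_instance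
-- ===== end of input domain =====

-- B replaces A's global comparison sort of the (index, marker) hit list by a distribution
-- (bucket) sort on the first-occurrence index, with only a per-bucket sort by length
-- (objective: alternative).

-- ===== PORT A =====
-- A's second loop: walk the sorted hits, skip already-seen lowered markers, stop once limit is reached
def pvLoopA : List (Int × String) → List String → PySem.Set String → Int → List String
  | [], ordered, _, _ => ordered
  | (_, marker) :: rest, ordered, seen, limit =>
      let normalized := PySem.Str.lower marker
      if PySem.Set.contains seen normalized then pvLoopA rest ordered seen limit
      else
        let ordered' := ordered ++ [marker]
        if limit ≤ PySem.List.len ordered' then ordered'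
        else pvLoopA rest ordered' (PySem.Set.add seen normalized) limit

-- '(text or "")' is text itself for every string (the '' branch yields '' again), so lowered = text.lower()
def extract_ordered_markers_py (text : String) (markers : List String) (limit : Int) : List String :=
  let lowered := PySem.Str.lower text
  let hits : List (Int × String) := markers.foldl (fun hits marker =>
    let index := PySem.Str.find lowered (PySem.Str.lower marker)
    if 0 ≤ index then hits ++ [(index, marker)] else hits) []
  let sortedHits := PySem.List.sorted2 hits (fun item => item.1) (fun item => PySem.Str.len item.2)
  pvLoopA sortedHits [] PySem.Set.empty limit

-- ===== PORT B =====
-- B's inner loop over one bucket: returns (ordered, seen, returned-early?)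
def pvInnerB : List String → List String → PySem.Set String → Int → (List String × PySem.Set String × Bool)
  | [], ordered, seen, _ => (ordered, seen, false)
  | marker :: rest, ordered, seen, limit =>
      let normalized := PySem.Str.lower marker
      if PySem.Set.contains seen normalized then pvInnerB rest ordered seen limit
      else
        let seen' := PySem.Set.add seen normalized
        let ordered' := ordered ++ [marker]
        if limit ≤ PySem.List.len ordered' then (ordered', seen', true)
        else pvInnerB rest ordered' seen' limit

-- B's outer loop over the buckets; the Bool flag propagates the early 'return ordered'
def pvOuterB : List (List String) → List String → PySem.Set String → Int → List String
  | [], ordered, _, _ => ordered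
  | bucket :: rest, ordered, seen, limit =>
      match pvInnerB (PySem.List.sorted bucket (fun m => PySem.Str.len m)) ordered seen limit with
      | (o, _, true) => o
      | (o, s, false) => pvOuterB rest o s limit

-- 'buckets[index].append(marker)' is ported with List.set/getD at index.toNat: exact because in
-- this branch 0 ≤ index and index ≤ len(lowered) (find never exceeds the length), so no IndexError.
def extract_ordered_markers_py_alt (text : String) (markers : List String) (limit : Int) : List String :=
  let lowered := PySem.Str.lower text
  let buckets : List (List String) := markers.foldl (fun B marker =>
    let index := PySem.Str.find lowered (PySem.Str.lower marker)
    if 0 ≤ index then B.set index.toNat (B.getD index.toNat [] ++ [marker]) else B)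
    (List.replicate (lowered.toList.length + 1) [])
  pvOuterB buckets [] PySem.Set.empty limit

-- ===== PRECONDITION & SPEC =====
def Spec_extract_ordered_markers_py (text : String) (markers : List String) (limit : Int) (out : List String) : Prop := out = extract_ordered_markers_py_alt text markers limit
instance (text : String) (markers : List String) (limit : Int) (out : List String) : Decidable (Spec_extract_ordered_markers_py text markers limit out) := by unfold Spec_extract_ordered_markers_py; infer_instance

-- ===== CLAIM (what is proved, stated in full; the proofs are below) =====
def Claim_equal_extract_ordered_markers_py : Prop := ∀ (text : String) (markers : List String) (limit : Int), Dom_extract_ordered_markers_py text markers limit → Spec_extract_ordered_markers_py text markers limit (extract_ordered_markers_py text markers limit)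

-- ===== LEMMAS AND PROOFS =====

-- the hit produced by marker m, and the filter deciding whether m is a hit
def pvF (lowered : String) (m : String) : Int × String := (PySem.Str.find lowered (PySem.Str.lower m), m)
def pvP (lowered : String) (m : String) : Bool := decide (0 ≤ PySem.Str.find lowered (PySem.Str.lower m))
def pvHits (lowered : String) (markers : List String) : List (Int × String) :=
  (markers.filter (pvP lowered)).map (pvF lowered)

-- the lexicographic sort key (first index, marker length)
def pvKeyL (q : Int × String) : Lex (Int × Int) := toLex (q.1, PySem.Str.len q.2)

-- the common scan both final loops reduce to: skip seen keys, append, stop at limit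
def pvScan : List String → List String → PySem.Set String → Int → List String
  | [], ordered, _, _ => ordered
  | m :: rest, ordered, seen, limit =>
      if PySem.Set.contains seen (PySem.Str.lower m) then pvScan rest ordered seen limit
      else
        let ordered' := ordered ++ [m]
        if limit ≤ PySem.List.len ordered' then ordered'
        else pvScan rest ordered' (PySem.Set.add seen (PySem.Str.lower m)) limit

lemma pvHits_cons (lowered m : String) (ms : List String) :
    pvHits lowered (m :: ms) = if 0 ≤ PySem.Str.find lowered (PySem.Str.lower m)
      then pvF lowered m :: pvHits lowered ms else pvHits lowered ms := by
  unfold pvHits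
  rw [List.filter_cons]
  by_cases h : (0 : Int) ≤ PySem.Str.find lowered (PySem.Str.lower m)
  · rw [if_pos (by simpa [pvP] using h), if_pos h, List.map_cons]
  · rw [if_neg (by simpa [pvP] using h), if_neg h]

lemma pvFoldA_eq (lowered : String) (markers : List String) : ∀ acc : List (Int × String),
    markers.foldl (fun hits marker =>
      let index := PySem.Str.find lowered (PySem.Str.lower marker)
      if 0 ≤ index then hits ++ [(index, marker)] else hits) acc
      = acc ++ pvHits lowered markers := by
  induction markers with
  | nil => intro acc; simp [pvHits]
  | cons m ms ih =>
      intro acc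
      simp only [List.foldl_cons]
      rw [pvHits_cons]
      by_cases h : (0 : Int) ≤ PySem.Str.find lowered (PySem.Str.lower m)
      · rw [if_pos h, if_pos h, ih]
        simp [pvF]
      · rw [if_neg h, if_neg h, ih]

lemma pvLexBool (x y : Int × Int) :
    decide (toLex x < toLex y) = (decide (x.1 < y.1) || (!decide (y.1 < x.1) && decide (x.2 < y.2))) := by
  by_cases h1 : x.1 < y.1 <;> by_cases h2 : y.1 < x.1 <;> by_cases h3 : x.2 < y.2 <;>
    simp [Prod.Lex.toLex_lt_toLex, h1, h2, h3] <;> omega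

lemma pvSorted2_eq (xs : List (Int × String)) :
    PySem.List.sorted2 xs (fun q => q.1) (fun q => PySem.Str.len q.2) = PySem.List.sorted xs pvKeyL := by
  unfold PySem.List.sorted2 PySem.List.sorted
  simp only [Bool.false_eq_true, reduceIte]
  congr 1
  funext acc q
  congr 1
  funext a b
  rw [pvKeyL, pvKeyL, pvLexBool]

-- hits carry their own find index, which is nonnegative and at most len(lowered)
lemma pvMem_hits {lowered : String} {markers : List String} {x : Int × String}
    (h : x ∈ pvHits lowered markers) :
    x.1 = PySem.Str.find lowered (PySem.Str.lower x.2) ∧ 0 ≤ x.1 ∧ x.1 ≤ lowered.toList.length := by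
  unfold pvHits at h
  rcases List.mem_map.mp h with ⟨m, hm, rfl⟩
  have h2 := List.of_mem_filter hm
  simp only [pvP, decide_eq_true_eq] at h2
  refine ⟨rfl, h2, ?_⟩
  simpa [pvF, PySem.Str.find_eq, PySem.Chars.len_eq] using
    PySem.Chars.find_le_length lowered.toList (PySem.Str.lower m).toList

-- ---- stable sort commutes with a filter that pins the sort key ----
lemma pvFilter_insertBy_ne {α : Type} (before : α → α → Bool) (q : α → Bool) (x : α)
    (hx : q x = false) : ∀ acc : List α,
    (PySem.List.insertBy before x acc).filter q = acc.filter q := by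
  intro acc
  induction acc with
  | nil => simp [PySem.List.insertBy, hx]
  | cons y ys ih =>
      rw [PySem.List.insertBy]
      by_cases h : before x y = true
      · rw [if_pos h, List.filter_cons, hx]; simp
      · rw [if_neg h, List.filter_cons, List.filter_cons]
        cases hq : q y <;> simp [ih]

lemma pvFilter_insertBy_eq {α κ : Type} [LinearOrder κ] (key : α → κ) (p : α → Bool) (c : κ)
    (hp : ∀ z, p z = true → key z = c) (x : α) (hx : p x = true) : ∀ acc : List α,
    acc.Pairwise (fun a b => key a ≤ key b) →
    (PySem.List.insertBy (fun a b => decide (key a < key b)) x acc).filter p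
      = acc.filter p ++ [x] := by
  intro acc
  induction acc with
  | nil => intro _; simp [PySem.List.insertBy, hx]
  | cons y ys ih =>
      intro hpw
      rw [PySem.List.insertBy]
      by_cases h : key x < key y
      · rw [if_pos (by simpa using h)]
        have hnil : (y :: ys).filter p = [] := by
          rw [List.filter_eq_nil_iff]
          intro z hz hpz
          have hyz : key y ≤ key z := by
            rcases List.mem_cons.mp hz with rfl | hz
            · exact le_refl _
            · exact (List.pairwise_cons.mp hpw).1 z hz
          have : key z = c := hp z hpz
          have hxc : key x = c := hp x hx
          exact absurd (this ▸ hxc ▸ (lt_of_lt_of_le h hyz)) (lt_irrefl _)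
        rw [show ((x :: y :: ys).filter p) = x :: ((y :: ys).filter p) from by
          rw [List.filter_cons, if_pos (by simp [hx])]]
        rw [hnil]
        simp
      · rw [if_neg (by simpa using h), List.filter_cons, List.filter_cons]
        cases hq : p y <;> simp [ih (List.Pairwise.of_cons hpw)]

lemma pvFilter_sorted {α κ : Type} [LinearOrder κ] (key : α → κ) (p : α → Bool) (c : κ)
    (hp : ∀ z, p z = true → key z = c) (l : List α) :
    (PySem.List.sorted l key).filter p = l.filter p := by
  induction l using List.reverseRecOn with
  | nil => simp [PySem.List.sorted]
  | append_singleton l y ih =>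
      have hs : PySem.List.sorted (l ++ [y]) key =
          PySem.List.insertBy (fun a b => decide (key a < key b)) y (PySem.List.sorted l key) := by
        rw [PySem.List.sorted_eq_foldl_insertBy, PySem.List.sorted_eq_foldl_insertBy, List.foldl_append]
        simp
      rw [hs, List.filter_append]
      by_cases h : p y = true
      · rw [pvFilter_insertBy_eq key p c hp y h _ (PySem.List.sorted_pairwise l key), ih]
        simp [h]
      · rw [pvFilter_insertBy_ne _ _ y (by simpa using h), ih]
        simp [h]

-- ---- a stable sort commutes with mapping the values the key reads through ----
lemma pvInsertBy_map {α β : Type} (f : α → β) (bef : β → β → Bool) (x : α) : ∀ acc : List α,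
    PySem.List.insertBy bef (f x) (acc.map f)
      = (PySem.List.insertBy (fun a b => bef (f a) (f b)) x acc).map f := by
  intro acc
  induction acc with
  | nil => simp [PySem.List.insertBy]
  | cons y ys ih =>
      rw [List.map_cons, PySem.List.insertBy, PySem.List.insertBy]
      by_cases h : bef (f x) (f y) = true
      · rw [if_pos h, if_pos h]; simp
      · rw [if_neg h, if_neg h, List.map_cons, ih]

lemma pvSorted_map {α β κ : Type} [LT κ] [DecidableLT κ] (f : α → β) (key : β → κ) (l : List α) :
    PySem.List.sorted (l.map f) key = (PySem.List.sorted l (fun a => key (f a))).map f := by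
  rw [PySem.List.sorted_eq_foldl_insertBy, PySem.List.sorted_eq_foldl_insertBy, List.foldl_map]
  have : ∀ (ms : List α) (acc : List α),
      ms.foldl (fun acc x => PySem.List.insertBy (fun a b => decide (key a < key b)) (f x) acc) (acc.map f)
        = (ms.foldl (fun acc x => PySem.List.insertBy (fun a b => decide (key (f a) < key (f b))) x acc) acc).map f := by
    intro ms
    induction ms with
    | nil => intro acc; rfl
    | cons m ms ih => intro acc; rw [List.foldl_cons, List.foldl_cons, pvInsertBy_map, ih]
  simpa using this l []

-- ---- the two final loops are the same scan ----
lemma pvLoopA_eq_scan : ∀ (l : List (Int × String)) (o : List String) (s : PySem.Set String) (L : Int),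
    pvLoopA l o s L = pvScan (l.map (·.2)) o s L := by
  intro l
  induction l with
  | nil => intro o s L; rfl
  | cons q l ih =>
      intro o s L
      obtain ⟨i, m⟩ := q
      rw [pvLoopA, List.map_cons, pvScan]
      by_cases h : PySem.Set.contains s (PySem.Str.lower m) = true
      · rw [if_pos h, if_pos h, ih]
      · rw [if_neg h, if_neg h]
        by_cases hl : L ≤ PySem.List.len (o ++ [m])
        · rw [if_pos hl, if_pos hl]
        · rw [if_neg hl, if_neg hl, ih]

lemma pvScan_append : ∀ (b ys o : List String) (s : PySem.Set String) (L : Int),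
    pvScan (b ++ ys) o s L = (match pvInnerB b o s L with
      | (o', _, true) => o'
      | (o', s', false) => pvScan ys o' s' L) := by
  intro b
  induction b with
  | nil => intro ys o s L; rfl
  | cons m b ih =>
      intro ys o s L
      rw [List.cons_append, pvScan, pvInnerB]
      by_cases h : PySem.Set.contains s (PySem.Str.lower m) = true
      · rw [if_pos h, if_pos h, ih]
      · rw [if_neg h, if_neg h]
        by_cases hl : L ≤ PySem.List.len (o ++ [m])
        · rw [if_pos hl, if_pos hl]
        · rw [if_neg hl, if_neg hl, ih]

lemma pvOuterB_eq_scan : ∀ (bs : List (List String)) (o : List String) (s : PySem.Set String) (L : Int),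
    pvOuterB bs o s L
      = pvScan ((bs.map (fun b => PySem.List.sorted b (fun m => PySem.Str.len m))).flatten) o s L := by
  intro bs
  induction bs with
  | nil => intro o s L; rfl
  | cons b bs ih =>
      intro o s L
      rw [pvOuterB, List.map_cons, List.flatten_cons, pvScan_append]
      cases h : pvInnerB (PySem.List.sorted b (fun m => PySem.Str.len m)) o s L with
      | mk o' rest =>
          cases rest with
          | mk s' flag => cases flag <;> simp [ih]

-- ---- the bucket fold equals the per-index slices of the hit list ----
lemma pvBuckets_eq (lowered : String) (markers : List String) :
    ∀ B₀ : List (List String), B₀.length = lowered.toList.length + 1 →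
    markers.foldl (fun B marker =>
      let index := PySem.Str.find lowered (PySem.Str.lower marker)
      if 0 ≤ index then B.set index.toNat (B.getD index.toNat [] ++ [marker]) else B) B₀
      = (List.range (lowered.toList.length + 1)).map (fun (j : Nat) =>
          B₀.getD j [] ++ ((pvHits lowered markers).filter (fun q => decide (q.1 = (j : Int)))).map (·.2)) := by
  induction markers with
  | nil =>
      intro B₀ hlen
      simp only [List.foldl_nil, pvHits, List.filter_nil, List.map_nil, List.filter_nil,
        List.map_nil, List.append_nil]
      refine List.ext_getElem (by simp [hlen]) ?_
      intro j h1 h2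
      have hj : j < B₀.length := h1
      simp only [List.getElem_map, List.getElem_range]
      rw [List.getD_eq_getElem B₀ [] (by simpa [hlen] using h2)]
  | cons m ms ih =>
      intro B₀ hlen
      rw [List.foldl_cons, pvHits_cons]
      by_cases h : (0 : Int) ≤ PySem.Str.find lowered (PySem.Str.lower m)
      · have hle : PySem.Str.find lowered (PySem.Str.lower m) ≤ (lowered.toList.length : Int) := by
          simpa [PySem.Str.find_eq, PySem.Chars.len_eq] using
            PySem.Chars.find_le_length lowered.toList (PySem.Str.lower m).toList
        simp only [if_pos h]
        rw [ih _ (by rw [List.length_set, hlen])]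
        refine List.map_congr_left ?_
        intro j hj
        have hjlt : j < lowered.toList.length + 1 := List.mem_range.mp hj
        have hjB : j < B₀.length := by omega
        rw [List.getD_eq_getElem _ [] (by rwa [List.length_set]), List.getElem_set]
        rw [List.filter_cons]
        by_cases he : (PySem.Str.find lowered (PySem.Str.lower m)).toNat = j
        · have hij : PySem.Str.find lowered (PySem.Str.lower m) = (j : Int) := by omega
          rw [if_pos he, if_pos (by simp only [pvF, decide_eq_true_eq]; exact hij), he]
          rw [List.getD_eq_getElem B₀ [] hjB]
          simp [pvF]
        · have hij : ¬ PySem.Str.find lowered (PySem.Str.lower m) = (j : Int) := by omega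
          rw [if_neg he, if_neg (by simp only [pvF, decide_eq_true_eq]; exact hij)]
          rw [List.getD_eq_getElem B₀ [] hjB]
      · simp only [if_neg h]
        rw [ih _ hlen]

-- flatten of a range-indexed family that is empty except possibly at index i₀
lemma pvFlatten_ite {α : Type} (F : List α) (i₀ : Int) : ∀ r : List Nat, r.Nodup →
    ((r.map (fun (j : Nat) => if i₀ = (j : Int) then F else [])).flatten)
      = if 0 ≤ i₀ ∧ i₀.toNat ∈ r then F else [] := by
  intro r
  induction r with
  | nil => intro _; simp
  | cons j r ih =>
      intro hnd
      rw [List.map_cons, List.flatten_cons, ih hnd.of_cons]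
      by_cases h : i₀ = (j : Int)
      · have h0 : 0 ≤ i₀ := by omega
        have hT : i₀.toNat = j := by omega
        have hnotin : i₀.toNat ∉ r := by rw [hT]; exact (List.nodup_cons.mp hnd).1
        rw [if_pos h, if_neg (by tauto), if_pos ⟨h0, by simp [hT]⟩]
        simp
      · rw [if_neg h]
        by_cases h0 : 0 ≤ i₀ ∧ i₀.toNat ∈ r
        · rw [if_pos h0, if_pos ⟨h0.1, List.mem_cons_of_mem _ h0.2⟩]
          simp
        · have hno : ¬ (0 ≤ i₀ ∧ i₀.toNat ∈ j :: r) := by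
            simp only [List.mem_cons]
            rintro ⟨hge, hj | hj⟩
            · exact h (by omega)
            · exact h0 ⟨hge, hj⟩
          rw [if_neg h0, if_neg hno]
          simp

-- a list that is pairwise ≤ on its key is determined by its filters at each key value
lemma pvUnique {α κ : Type} [LinearOrder κ] (key : α → κ) :
    ∀ l₁ l₂ : List α, l₁.Pairwise (fun a b => key a ≤ key b) → l₂.Pairwise (fun a b => key a ≤ key b) →
    (∀ v, l₁.filter (fun x => decide (key x = v)) = l₂.filter (fun x => decide (key x = v))) →
    l₁ = l₂ := by
  intro l₁
  induction l₁ with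
  | nil =>
      intro l₂ _ _ hf
      cases l₂ with
      | nil => rfl
      | cons b t₂ =>
          have := hf (key b)
          simp at this
  | cons a t₁ ih =>
      intro l₂ hp₁ hp₂ hf
      cases l₂ with
      | nil =>
          have := hf (key a)
          simp at this
      | cons b t₂ =>
          have hmem₁ : ∃ z ∈ b :: t₂, key z = key a := by
            have hne : (List.filter (fun x => decide (key x = key a)) (b :: t₂)) ≠ [] := by
              rw [← hf (key a)]
              simp
            rcases List.exists_mem_of_ne_nil _ hne with ⟨z, hz⟩
            exact ⟨z, List.mem_of_mem_filter hz, by simpa using List.of_mem_filter hz⟩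
          have hmem₂ : ∃ z ∈ a :: t₁, key z = key b := by
            have hne : (List.filter (fun x => decide (key x = key b)) (a :: t₁)) ≠ [] := by
              rw [hf (key b)]
              simp
            rcases List.exists_mem_of_ne_nil _ hne with ⟨z, hz⟩
            exact ⟨z, List.mem_of_mem_filter hz, by simpa using List.of_mem_filter hz⟩
          have hab : key a = key b := by
            rcases hmem₁ with ⟨z₁, hz₁, hk₁⟩
            rcases hmem₂ with ⟨z₂, hz₂, hk₂⟩
            have hba : key b ≤ key a := by
              rcases List.mem_cons.mp hz₁ with rfl | hz
              · exact le_of_eq hk₁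
              · exact hk₁ ▸ (List.pairwise_cons.mp hp₂).1 z₁ hz
            have hab' : key a ≤ key b := by
              rcases List.mem_cons.mp hz₂ with rfl | hz
              · exact le_of_eq hk₂
              · exact hk₂ ▸ (List.pairwise_cons.mp hp₁).1 z₂ hz
            exact le_antisymm hab' hba
          have h1 := hf (key a)
          rw [List.filter_cons, List.filter_cons,
            if_pos (show (decide (key a = key a)) = true by simp),
            if_pos (show (decide (key b = key a)) = true by simp [hab])] at h1
          have hhead : a = b := ((List.cons.injEq _ _ _ _).mp h1).1
          have htail : t₁ = t₂ := by
            refine ih t₂ hp₁.of_cons hp₂.of_cons ?_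
            intro v
            have hv := hf v
            rw [List.filter_cons, List.filter_cons] at hv
            by_cases hva : key a = v
            · rw [if_pos (show (decide (key a = v)) = true by simp [hva]),
                if_pos (show (decide (key b = v)) = true by simp [← hab, hva])] at hv
              exact ((List.cons.injEq _ _ _ _).mp hv).2
            · rwa [if_neg (show ¬ (decide (key a = v)) = true by simp [hva]),
                if_neg (show ¬ (decide (key b = v)) = true by simp [← hab, hva])] at hv
          rw [hhead, htail]

-- members of a sorted per-index slice carry that index
lemma pvMem_slice {lowered : String} {markers : List String} {j : Nat} {x : Int × String}
    (hx : x ∈ PySem.List.sorted ((pvHits lowered markers).filter (fun q => decide (q.1 = (j : Int))))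
      (fun q => PySem.Str.len q.2)) : x.1 = (j : Int) ∧ x ∈ pvHits lowered markers := by
  have hx' := (PySem.List.mem_sorted _ _ _ _).mp hx
  exact ⟨by simpa using List.of_mem_filter hx', List.mem_of_mem_filter hx'⟩

-- the bucketed, per-bucket-length-sorted hits ARE the (index, length)-sorted hits
lemma pvSlices_eq_sorted (lowered : String) (markers : List String) :
    ((List.range (lowered.toList.length + 1)).map (fun (j : Nat) =>
        PySem.List.sorted ((pvHits lowered markers).filter (fun q => decide (q.1 = (j : Int))))
          (fun q => PySem.Str.len q.2))).flatten
      = PySem.List.sorted (pvHits lowered markers) pvKeyL := by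
  apply pvUnique pvKeyL
  · -- the flatten is pairwise ≤ on the lexicographic key
    rw [List.pairwise_flatten]
    constructor
    · intro l' hl'
      rcases List.mem_map.mp hl' with ⟨j, _, rfl⟩
      refine List.Pairwise.imp_of_mem ?_
        (PySem.List.sorted_pairwise ((pvHits lowered markers).filter _) (fun q => PySem.Str.len q.2))
      intro a b ha hb hle
      have ha1 := (pvMem_slice ha).1
      have hb1 := (pvMem_slice hb).1
      unfold pvKeyL
      rw [Prod.Lex.toLex_le_toLex]
      exact Or.inr ⟨by rw [ha1, hb1], hle⟩
    · rw [List.pairwise_map]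
      refine List.Pairwise.imp_of_mem ?_ List.pairwise_lt_range
      intro j₁ j₂ _ _ hlt x hx y hy
      have hx1 := (pvMem_slice hx).1
      have hy1 := (pvMem_slice hy).1
      unfold pvKeyL
      rw [Prod.Lex.toLex_le_toLex]
      exact Or.inl (by rw [hx1, hy1]; exact_mod_cast hlt)
  · exact PySem.List.sorted_pairwise _ _
  · intro v
    rw [pvFilter_sorted pvKeyL (fun x => decide (pvKeyL x = v)) v
      (fun z hz => by simpa using hz)]
    rw [List.filter_flatten, List.map_map]
    have hcomp : ∀ j : Nat,
        ((PySem.List.sorted ((pvHits lowered markers).filter (fun q => decide (q.1 = (j : Int))))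
            (fun q => PySem.Str.len q.2)).filter (fun x => decide (pvKeyL x = v)))
          = if (ofLex v).1 = (j : Int)
            then (pvHits lowered markers).filter (fun x => decide (pvKeyL x = v)) else [] := by
      intro j
      by_cases hj : (ofLex v).1 = (j : Int)
      · rw [if_pos hj]
        rw [pvFilter_sorted (fun q => PySem.Str.len q.2) (fun x => decide (pvKeyL x = v)) (ofLex v).2
          (fun z hz => by
            have hzv : pvKeyL z = v := by simpa using hz
            unfold pvKeyL at hzv
            exact congrArg (fun w => (ofLex w).2) hzv)]
        rw [List.filter_filter]
        refine List.filter_congr ?_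
        intro x _
        simp only [Bool.and_eq_left_iff_imp, decide_eq_true_eq]
        intro hxv
        have hx1 : x.1 = (ofLex v).1 := by
          unfold pvKeyL at hxv
          exact congrArg (fun w => (ofLex w).1) hxv
        rw [hx1, hj]
      · rw [if_neg hj, List.filter_eq_nil_iff]
        intro x hx hc
        have hx1 := (pvMem_slice hx).1
        have hxv : pvKeyL x = v := by simpa using hc
        have hxv1 : x.1 = (ofLex v).1 := by
          unfold pvKeyL at hxv
          exact congrArg (fun w => (ofLex w).1) hxv
        exact hj (by rw [← hxv1, hx1])
    rw [List.map_congr_left (fun j (_ : j ∈ List.range (lowered.toList.length + 1)) => by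
      simpa [Function.comp] using hcomp j)]
    rw [pvFlatten_ite _ _ _ List.nodup_range]
    by_cases hc : 0 ≤ (ofLex v).1 ∧ ((ofLex v).1).toNat ∈ List.range (lowered.toList.length + 1)
    · rw [if_pos hc]
    · rw [if_neg hc, eq_comm, List.filter_eq_nil_iff]
      intro x hx hxc
      have hxv : pvKeyL x = v := by simpa using hxc
      have hx1 : x.1 = (ofLex v).1 := by
        unfold pvKeyL at hxv
        exact congrArg (fun w => (ofLex w).1) hxv
      obtain ⟨-, h0, hle⟩ := pvMem_hits hx
      exact hc ⟨by omega, List.mem_range.mpr (by omega)⟩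

-- assembling B's list: empty-initialised buckets, per-bucket length sort, then flatten
lemma pvBucketLists_eq (lowered : String) (markers : List String) :
    (((List.range (lowered.toList.length + 1)).map (fun (j : Nat) =>
        (List.replicate (lowered.toList.length + 1) ([] : List String)).getD j []
          ++ ((pvHits lowered markers).filter (fun q => decide (q.1 = (j : Int)))).map (·.2))).map
      (fun b => PySem.List.sorted b (fun m => PySem.Str.len m))).flatten
      = (PySem.List.sorted (pvHits lowered markers) pvKeyL).map (·.2) := by
  rw [List.map_map]
  rw [List.map_congr_left (fun j (_ : j ∈ List.range (lowered.toList.length + 1)) =>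
    (show _ = ((PySem.List.sorted ((pvHits lowered markers).filter (fun q => decide (q.1 = (j : Int))))
        (fun q => PySem.Str.len q.2)).map (fun q : Int × String => q.2)) from by
      simp only [Function.comp_apply]
      rw [show (List.replicate (lowered.toList.length + 1) ([] : List String)).getD j [] = []
        from by simp [List.getD], List.nil_append]
      exact pvSorted_map (fun q : Int × String => q.2) (fun m : String => PySem.Str.len m) _))]
  rw [show ((List.range (lowered.toList.length + 1)).map (fun (j : Nat) =>
      (PySem.List.sorted ((pvHits lowered markers).filter (fun q => decide (q.1 = (j : Int))))
        (fun q => PySem.Str.len q.2)).map (·.2)))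
    = (((List.range (lowered.toList.length + 1)).map (fun (j : Nat) =>
      PySem.List.sorted ((pvHits lowered markers).filter (fun q => decide (q.1 = (j : Int))))
        (fun q => PySem.Str.len q.2))).map (List.map (fun q : Int × String => q.2))) from by rw [List.map_map]; rfl]
  rw [← List.map_flatten, pvSlices_eq_sorted]

-- ===== VERDICT (by name: the statement is the Claim_ definition above) =====
theorem extract_ordered_markers_py_spec : Claim_equal_extract_ordered_markers_py := by
  intro text markers limit _
  unfold Spec_extract_ordered_markers_py extract_ordered_markers_py extract_ordered_markers_py_alt
  simp only []
  rw [pvFoldA_eq (PySem.Str.lower text) markers [], List.nil_append, pvSorted2_eq]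
  rw [pvBuckets_eq (PySem.Str.lower text) markers _ (by simp)]
  rw [pvLoopA_eq_scan, pvOuterB_eq_scan]
  rw [pvBucketLists_eq (PySem.Str.lower text) markers]
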